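-- pv_equiv track=rewrite | github.com/indigoYoshimaru/google-foobar | level4/bringing-a-gun-to-a-trainer-fight/solution.py | project_y
-- ===== SOURCE A (Python) =====
-- def project_y(pos, dim, y):
--     top, bottom = [pos], []
--     positive_proj_pos = pos
--     negative_proj_pos = pos
--     # project top and bottom wall
--     for i in range(1, y+2):
--         positive_proj_pos = [positive_proj_pos[0], 2*i*dim[1] - positive_proj_pos[1]]
--         negative_proj_pos = [negative_proj_pos[0], -2*(i-1)*dim[1]- negative_proj_pos[1]]
--         top.append(positive_proj_pos)
--         bottom.append(negative_proj_pos)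
--     return top + bottom
-- ===== SOURCE B (Python) =====
-- def project_y(pos, dim, y):
--     rng = range(1, y + 2)
--     top = [pos] + [[pos[0], (i + 1) * dim[1] - pos[1] if i % 2 else i * dim[1] + pos[1]]
--                    for i in rng]
--     bottom = [[pos[0], -(i - 1) * dim[1] - pos[1] if i % 2 else -i * dim[1] + pos[1]]
--               for i in rng]
--     return top + bottom
-- ===== Notes on version B (the rewrite author's own statement) =====
-- stated objective: simpler
-- what changed: Replaced A's two cross-iteration mutating accumulators (each element computed from the previous one) with a direct odd/even closed-form formula per index, built by two stateless comprehensions over the same range.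
import Mathlib
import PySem

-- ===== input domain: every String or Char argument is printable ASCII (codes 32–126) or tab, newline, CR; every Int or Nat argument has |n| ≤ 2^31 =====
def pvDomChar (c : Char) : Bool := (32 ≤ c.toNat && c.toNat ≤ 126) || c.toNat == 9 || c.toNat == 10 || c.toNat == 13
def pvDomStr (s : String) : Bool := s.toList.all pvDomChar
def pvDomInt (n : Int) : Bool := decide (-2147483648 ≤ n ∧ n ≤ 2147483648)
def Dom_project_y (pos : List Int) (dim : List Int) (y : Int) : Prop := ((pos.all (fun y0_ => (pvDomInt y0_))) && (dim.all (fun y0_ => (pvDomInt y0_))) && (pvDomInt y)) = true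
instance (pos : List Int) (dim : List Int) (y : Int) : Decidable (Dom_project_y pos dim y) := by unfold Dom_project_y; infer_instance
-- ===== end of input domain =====

-- B replaces A's two cross-iteration mutating accumulators with a direct odd/even closed form
-- per index, built by two comprehensions (objective: simpler; same O(y) cost).

-- ===== PORT A =====
-- literal port of A's loop: state = (top, bottom, positive_proj_pos, negative_proj_pos);
-- the two appended-to lists are kept reversed (cons per append, one final reverse) so the
-- port evaluates in linear time; same elements in the same order as A's top/bottom
def project_y (pos : List Int) (dim : List Int) (y : Int) : List (List Int) :=
  let st :=
    (PySem.List.pyRange 1 (y + 2) 1).foldl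
      (fun (s : List (List Int) × List (List Int) × List Int × List Int) i =>
        let pp' := [PySem.List.pyGetD s.2.2.1 0 0,
                    2 * i * PySem.List.pyGetD dim 1 0 - PySem.List.pyGetD s.2.2.1 1 0]
        let np' := [PySem.List.pyGetD s.2.2.2 0 0,
                    -2 * (i - 1) * PySem.List.pyGetD dim 1 0 - PySem.List.pyGetD s.2.2.2 1 0]
        (pp' :: s.1, np' :: s.2.1, pp', np'))
      ([pos], [], pos, pos)
  st.1.reverse ++ st.2.1.reverse

-- ===== PORT B =====
def project_y_alt (pos : List Int) (dim : List Int) (y : Int) : List (List Int) :=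
  let rng := PySem.List.pyRange 1 (y + 2) 1
  ([pos] ++ rng.map (fun i =>
      [PySem.List.pyGetD pos 0 0,
       if i % 2 ≠ 0 then (i + 1) * PySem.List.pyGetD dim 1 0 - PySem.List.pyGetD pos 1 0
       else i * PySem.List.pyGetD dim 1 0 + PySem.List.pyGetD pos 1 0]))
  ++ rng.map (fun i =>
      [PySem.List.pyGetD pos 0 0,
       if i % 2 ≠ 0 then -(i - 1) * PySem.List.pyGetD dim 1 0 - PySem.List.pyGetD pos 1 0
       else -i * PySem.List.pyGetD dim 1 0 + PySem.List.pyGetD pos 1 0])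

-- ===== PRECONDITION & SPEC =====
-- Pre_ excludes exactly the inputs on which A raises IndexError: when the loop runs
-- (y ≥ 0), pos and dim must both have at least two elements.
def Pre_project_y (pos : List Int) (dim : List Int) (y : Int) : Prop :=
  y < 0 ∨ (2 ≤ pos.length ∧ 2 ≤ dim.length)
instance (pos : List Int) (dim : List Int) (y : Int) : Decidable (Pre_project_y pos dim y) := by
  unfold Pre_project_y; infer_instance
def pvWitness_project_y : List Int × List Int × Int := ([2, 3], [5, 7], 2)

def Spec_project_y (pos : List Int) (dim : List Int) (y : Int) (out : List (List Int)) : Prop := out = project_y_alt pos dim y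
instance (pos : List Int) (dim : List Int) (y : Int) (out : List (List Int)) : Decidable (Spec_project_y pos dim y out) := by unfold Spec_project_y; infer_instance

-- ===== CLAIM (what is proved, stated in full; the proofs are below) =====
def Claim_equal_project_y : Prop := ∀ (pos : List Int) (dim : List Int) (y : Int), Dom_project_y pos dim y → Pre_project_y pos dim y → Spec_project_y pos dim y (project_y pos dim y)

-- ===== LEMMAS AND PROOFS =====

-- closed forms for the two accumulators of A (these are exactly B's per-index formulas)
def pvTop (d p1 i : Int) : Int := if i % 2 ≠ 0 then (i + 1) * d - p1 else i * d + p1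
def pvBot (d p1 i : Int) : Int := if i % 2 ≠ 0 then -(i - 1) * d - p1 else -i * d + p1

-- the loop body of A's port, restated as a named function (definitionally the same lambda)
def pvStep (dim : List Int) (s : List (List Int) × List (List Int) × List Int × List Int)
    (i : Int) : List (List Int) × List (List Int) × List Int × List Int :=
  let pp' := [PySem.List.pyGetD s.2.2.1 0 0,
              2 * i * PySem.List.pyGetD dim 1 0 - PySem.List.pyGetD s.2.2.1 1 0]
  let np' := [PySem.List.pyGetD s.2.2.2 0 0,
              -2 * (i - 1) * PySem.List.pyGetD dim 1 0 - PySem.List.pyGetD s.2.2.2 1 0]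
  (pp' :: s.1, np' :: s.2.1, pp', np')

theorem pvTop_rec (d p1 i : Int) : pvTop d p1 i = 2 * i * d - pvTop d p1 (i - 1) := by
  rcases Int.emod_two_eq i with h | h <;>
    simp [pvTop, h, show (i - 1) % 2 = 1 - i % 2 by omega] <;> ring

theorem pvBot_rec (d p1 i : Int) : pvBot d p1 i = -2 * (i - 1) * d - pvBot d p1 (i - 1) := by
  rcases Int.emod_two_eq i with h | h <;>
    simp [pvBot, h, show (i - 1) % 2 = 1 - i % 2 by omega] <;> ring

-- invariant of A's loop over range(1, n+1)
theorem pvA_fold (pos dim : List Int) (n : Nat) :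
    (PySem.List.pyRange 1 ((n : Int) + 1) 1).foldl (pvStep dim) ([pos], [], pos, pos) =
      (List.reverse ([pos] ++ (PySem.List.pyRange 1 ((n : Int) + 1) 1).map
          (fun i => [PySem.List.pyGetD pos 0 0,
                     pvTop (PySem.List.pyGetD dim 1 0) (PySem.List.pyGetD pos 1 0) i])),
       List.reverse ((PySem.List.pyRange 1 ((n : Int) + 1) 1).map
          (fun i => [PySem.List.pyGetD pos 0 0,
                     pvBot (PySem.List.pyGetD dim 1 0) (PySem.List.pyGetD pos 1 0) i])),
       if n = 0 then pos else
         [PySem.List.pyGetD pos 0 0,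
          pvTop (PySem.List.pyGetD dim 1 0) (PySem.List.pyGetD pos 1 0) (n : Int)],
       if n = 0 then pos else
         [PySem.List.pyGetD pos 0 0,
          pvBot (PySem.List.pyGetD dim 1 0) (PySem.List.pyGetD pos 1 0) (n : Int)]) := by
  induction n with
  | zero =>
    rw [show ((0 : Nat) : Int) + 1 = 1 by norm_num, PySem.List.pyRange_one_eq_nil (by omega)]
    simp
  | succ m ih =>
    have hsplit : PySem.List.pyRange 1 (((m + 1 : Nat) : Int) + 1) 1
        = PySem.List.pyRange 1 ((m : Int) + 1) 1 ++ [(m : Int) + 1] := by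
      push_cast
      rw [show (m : Int) + 1 + 1 = ((m : Int) + 1) + 1 by ring]
      exact PySem.List.pyRange_one_succ_right (by omega)
    rw [hsplit, List.foldl_append, ih, List.map_append, List.map_append]
    rcases Nat.eq_zero_or_pos m with hm | hm
    · subst hm
      rw [show ((0 : Nat) : Int) + 1 = 1 by norm_num, PySem.List.pyRange_one_eq_nil (by omega)]
      simp only [List.map_nil, List.append_nil, List.foldl_cons, List.foldl_nil]
      simp [pvStep, pvTop, pvBot, PySem.List.pyGetD_zero, show ((1:Int)) % 2 = 1 from rfl]
    · have hmne : ¬ m = 0 := by omega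
      rw [if_neg hmne, if_neg hmne, if_neg (show ¬ (m+1) = 0 by omega),
          if_neg (show ¬ (m+1) = 0 by omega), List.foldl_cons, List.foldl_nil]
      simp only [pvStep, List.map_cons, List.map_nil, PySem.List.pyGetD_zero_cons]
      push_cast
      rw [pvTop_rec (PySem.List.pyGetD dim 1 0) (PySem.List.pyGetD pos 1 0) ((m : Int) + 1),
          pvBot_rec (PySem.List.pyGetD dim 1 0) (PySem.List.pyGetD pos 1 0) ((m : Int) + 1),
          show (m : Int) + 1 - 1 = (m : Int) by ring]
      simp [PySem.List.pyGetD, List.reverse_append]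

-- ===== VERDICT (by name: the statement is the Claim_ definition above) =====
theorem project_y_spec : Claim_equal_project_y := by
  intro pos dim y _ _
  unfold Spec_project_y project_y project_y_alt
  by_cases hy : y + 2 ≤ 1
  · rw [PySem.List.pyRange_one_eq_nil hy]; simp
  · have h2 : (((y + 1).toNat : Int)) + 1 = y + 2 := by omega
    rw [← h2]
    have := pvA_fold pos dim (y + 1).toNat
    rw [show (fun (s : List (List Int) × List (List Int) × List Int × List Int) (i : Int) =>
        let pp' := [PySem.List.pyGetD s.2.2.1 0 0,
                    2 * i * PySem.List.pyGetD dim 1 0 - PySem.List.pyGetD s.2.2.1 1 0]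
        let np' := [PySem.List.pyGetD s.2.2.2 0 0,
                    -2 * (i - 1) * PySem.List.pyGetD dim 1 0 - PySem.List.pyGetD s.2.2.2 1 0]
        (pp' :: s.1, np' :: s.2.1, pp', np')) = pvStep dim from rfl, this]
    simp [pvTop, pvBot, List.reverse_reverse, List.reverse_append]
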